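-- pv_equiv track=rewrite | github.com/BalderHolst/uni-notes | .obsidian/min code/create events.py | find_image
-- ===== SOURCE A (Python) =====
-- def find_image(lines):
--     image = ""
--     for line in lines:
--         pointer = line.find("![")
--         if(pointer != -1):
--             image = line[line.find(']') + 2:line.find(')')]
--
--         pointer = line.find("![[")
--         if(pointer != -1):
--             image = line[pointer + 3:line.find(']]')]
--
--
--     if(len(image) > 0):
--         return(image)
--     else:
--         return(None)
-- ===== SOURCE B (Python) =====
-- def find_image(lines):
--     for line in reversed(lines):
--         if "![" in line:
--             if "![[" in line:
--                 img = line[line.find("![[") + 3:line.find("]]")]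
--             else:
--                 img = line[line.find("]") + 2:line.find(")")]
--             return img if len(img) > 0 else None
--     return None
-- ===== Notes on version B (the rewrite author's own statement) =====
-- stated objective: simpler
-- what changed: Replaces A's forward pass that keeps overwriting an accumulator with a backward scan that returns at the first (i.e. last overall) line containing '![', extracting the image reference from that single line only.
import Mathlib
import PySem

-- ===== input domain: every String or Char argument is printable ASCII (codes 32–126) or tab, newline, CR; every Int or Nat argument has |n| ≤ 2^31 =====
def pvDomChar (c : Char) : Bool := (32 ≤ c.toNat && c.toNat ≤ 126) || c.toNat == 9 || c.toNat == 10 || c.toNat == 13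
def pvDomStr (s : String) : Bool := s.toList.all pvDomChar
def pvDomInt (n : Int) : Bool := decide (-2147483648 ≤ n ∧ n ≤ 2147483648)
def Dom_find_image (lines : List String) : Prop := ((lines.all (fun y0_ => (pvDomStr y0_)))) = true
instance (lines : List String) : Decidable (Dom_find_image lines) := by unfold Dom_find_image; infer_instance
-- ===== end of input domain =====

-- B replaces A's forward accumulate-and-overwrite loop with a backward scan that
-- stops at the last line containing "![" (objective: simpler; same return value).

-- ===== PORT A =====
-- literal transliteration of A's loop: running `image` accumulator over the lines
def find_image (lines : List String) : Option String :=
  let image := lines.foldl (fun image line =>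
    let pointer := PySem.Str.find line "!["
    let image := if pointer ≠ -1 then
        PySem.Str.slice line (some (PySem.Str.find line "]" + 2)) (some (PySem.Str.find line ")"))
      else image
    let pointer := PySem.Str.find line "![["
    if pointer ≠ -1 then
        PySem.Str.slice line (some (pointer + 3)) (some (PySem.Str.find line "]]"))
      else image) ""
  if PySem.Str.len image > 0 then some image else none

-- ===== PORT B =====
-- B's body of the loop once a line containing "![" is found
def pvPick (line : String) : Option String :=
  let img := if PySem.Str.isIn "![[" line then
      PySem.Str.slice line (some (PySem.Str.find line "![[" + 3)) (some (PySem.Str.find line "]]"))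
    else
      PySem.Str.slice line (some (PySem.Str.find line "]" + 2)) (some (PySem.Str.find line ")"))
  if PySem.Str.len img > 0 then some img else none

-- B's `for line in reversed(lines)` with early return
def pvScan : List String → Option String
  | [] => none
  | line :: rest => if PySem.Str.isIn "![" line then pvPick line else pvScan rest

def find_image_alt (lines : List String) : Option String := pvScan lines.reverse

-- ===== PRECONDITION & SPEC =====
def Spec_find_image (lines : List String) (out : Option String) : Prop := out = find_image_alt lines
instance (lines : List String) (out : Option String) : Decidable (Spec_find_image lines out) := by unfold Spec_find_image; infer_instance

-- ===== CLAIM (what is proved, stated in full; the proofs are below) =====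
def Claim_equal_find_image : Prop := ∀ (lines : List String), Dom_find_image lines → Spec_find_image lines (find_image lines)

-- ===== LEMMAS AND PROOFS =====

-- the test A's loop branches on, and the value it assigns on a hit
def pvHit (line : String) : Bool := PySem.Str.isIn "![" line

def pvVal (line : String) : String :=
  if PySem.Str.isIn "![[" line then
      PySem.Str.slice line (some (PySem.Str.find line "![[" + 3)) (some (PySem.Str.find line "]]"))
    else
      PySem.Str.slice line (some (PySem.Str.find line "]" + 2)) (some (PySem.Str.find line ")"))

-- A's step function equals "if hit then pvVal else keep"
theorem pvStep_eq (image line : String) :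
    (let pointer := PySem.Str.find line "!["
     let image := if pointer ≠ -1 then
         PySem.Str.slice line (some (PySem.Str.find line "]" + 2)) (some (PySem.Str.find line ")"))
       else image
     let pointer := PySem.Str.find line "![["
     if pointer ≠ -1 then
         PySem.Str.slice line (some (pointer + 3)) (some (PySem.Str.find line "]]"))
       else image)
    = if pvHit line then pvVal line else image := by
  simp only [pvHit, pvVal, PySem.Str.find, PySem.Str.isIn]
  by_cases f2 : PySem.Chars.find line.toList ['!', '[', '['] = -1
  · have h2 : PySem.Chars.isIn ['!', '[', '['] line.toList = false :=
      (PySem.Chars.isIn_eq_false_iff _ _).mpr ((PySem.Chars.find_eq_neg_one_iff _ _).mp f2)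
    by_cases f1 : PySem.Chars.find line.toList ['!', '['] = -1
    · have h1 : PySem.Chars.isIn ['!', '['] line.toList = false :=
        (PySem.Chars.isIn_eq_false_iff _ _).mpr ((PySem.Chars.find_eq_neg_one_iff _ _).mp f1)
      simp [f1, f2, h1]
    · have h1 : PySem.Chars.isIn ['!', '['] line.toList = true :=
        (PySem.Chars.isIn_iff_infix _ _).mpr ((PySem.Chars.find_ne_neg_one_iff _ _).mp f1)
      simp [f1, f2, h1, h2]
  · have inf2 : ['!', '[', '['] <:+: line.toList := (PySem.Chars.find_ne_neg_one_iff _ _).mp f2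
    have h2 : PySem.Chars.isIn ['!', '[', '['] line.toList = true :=
      (PySem.Chars.isIn_iff_infix _ _).mpr inf2
    have inf1 : ['!', '['] <:+: line.toList :=
      (List.IsPrefix.isInfix (l₂ := ['!', '[', '[']) (by decide)).trans inf2
    have f1 : PySem.Chars.find line.toList ['!', '['] ≠ -1 :=
      (PySem.Chars.find_ne_neg_one_iff _ _).mpr inf1
    have h1 : PySem.Chars.isIn ['!', '['] line.toList = true :=
      (PySem.Chars.isIn_iff_infix _ _).mpr inf1
    simp [f2, h1, h2]

-- A's fold computes the pvVal of the LAST hit (= first hit of the reversed list), else its accumulator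
theorem pvFold_eq (xs : List String) (image : String) :
    xs.foldl (fun image line =>
      let pointer := PySem.Str.find line "!["
      let image := if pointer ≠ -1 then
          PySem.Str.slice line (some (PySem.Str.find line "]" + 2)) (some (PySem.Str.find line ")"))
        else image
      let pointer := PySem.Str.find line "![["
      if pointer ≠ -1 then
          PySem.Str.slice line (some (pointer + 3)) (some (PySem.Str.find line "]]"))
        else image) image
    = ((xs.reverse.find? pvHit).map pvVal).getD image := by
  induction xs generalizing image with
  | nil => rfl
  | cons l xs ih =>
    rw [List.foldl_cons, ih, List.reverse_cons, List.find?_append]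
    by_cases hfind : (xs.reverse.find? pvHit).isSome
    · obtain ⟨y, hy⟩ := Option.isSome_iff_exists.mp hfind
      simp [hy]
    · rw [Option.not_isSome_iff_eq_none] at hfind
      rw [hfind, pvStep_eq]
      by_cases h : pvHit l = true
      · rw [List.find?_cons_of_pos h, if_pos h]
        simp
      · rw [List.find?_cons_of_neg (by simpa using h), if_neg h]
        simp

-- B's scan in terms of find?
theorem pvScan_eq (ys : List String) :
    pvScan ys = ((ys.find? pvHit).map pvVal).bind
      (fun v => if PySem.Str.len v > 0 then some v else none) := by
  induction ys with
  | nil => rfl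
  | cons l ys ih =>
    by_cases h : pvHit l = true
    · rw [List.find?_cons_of_pos h]
      have h' : PySem.Str.isIn "![" l = true := h
      simp only [pvScan, h', if_true, Option.map_some, Option.bind_some]
      rfl
    · rw [List.find?_cons_of_neg (by simpa using h)]
      have h' : PySem.Str.isIn "![" l = false := by simpa using h
      simp only [pvScan, h', Bool.false_eq_true, if_false]
      exact ih

-- ===== VERDICT (by name: the statement is the Claim_ definition above) =====
theorem find_image_spec : Claim_equal_find_image := by
  intro lines _
  unfold Spec_find_image find_image find_image_alt
  rw [pvFold_eq, pvScan_eq]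
  cases hfind : lines.reverse.find? pvHit with
  | none => simp [PySem.Str.len]
  | some l => rfl
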